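-- pv_equiv track=rewrite | github.com/iasmimtx/Questoes-p1 | blefe.py | blefe
-- ===== SOURCE A (Python) =====
-- def blefe(lista):
--     if len(lista) == 0:
--         return []
--     alteracoes = [0]
--     for i in range(1, len(lista)):
--         if lista[i] > lista[i-1]:
--             alteracoes.append(lista[i] - lista[i-1])
--             lista[i] = lista[i-1]
--         else:
--             alteracoes.append(0)
--     return alteracoes
-- ===== SOURCE B (Python) =====
-- def blefe(lista):
--     # Two-pass: build the prefix-minimum table, then take element-wise differences.
--     p = []
--     m = None
--     for x in lista:
--         m = x if m is None else min(m, x)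
--         p.append(m)
--     alteracoes = [x - m for x, m in zip(lista, p)]
--     lista[:] = p
--     return alteracoes
-- ===== Notes on version B (the rewrite author's own statement) =====
-- stated objective: alternative
-- what changed: Replaces the interleaved compare-and-lower loop over indices with a prefix-minimum table built in one pass plus a separate element-wise difference pass, then a single slice assignment for the mutation.
import Mathlib
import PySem

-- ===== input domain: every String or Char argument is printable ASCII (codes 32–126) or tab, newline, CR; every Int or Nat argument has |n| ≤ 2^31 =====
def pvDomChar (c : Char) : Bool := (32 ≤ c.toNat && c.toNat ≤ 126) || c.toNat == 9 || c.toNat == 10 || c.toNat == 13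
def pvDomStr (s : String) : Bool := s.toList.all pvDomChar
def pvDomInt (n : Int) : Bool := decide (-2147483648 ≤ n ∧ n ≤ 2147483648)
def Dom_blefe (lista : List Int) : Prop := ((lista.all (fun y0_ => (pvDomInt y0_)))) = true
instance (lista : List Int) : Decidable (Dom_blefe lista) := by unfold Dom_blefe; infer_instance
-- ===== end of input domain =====

-- B replaces A's interleaved compare-and-lower index loop by a prefix-minimum table pass plus a
-- separate element-wise difference pass (alternative decomposition, same cost). A mutates `lista`
-- in place; B performs the same mutation via a slice assignment — the theorem is about the return value.


-- ===== PORT A =====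
-- literal port of A: the loop body reads lista[i], lista[i-1], appends to alteracoes,
-- and lowers lista[i] in place (the list is threaded as the first state component)
def blefe (lista : List Int) : List Int :=
  if lista.length = 0 then []
  else
    (((PySem.List.pyRange 1 (lista.length : Int) 1).foldl
      (fun (st : List Int × List Int) (i : Int) =>
        let li := (PySem.List.pyGet? st.1 i).getD 0
        let lim := (PySem.List.pyGet? st.1 (i - 1)).getD 0
        if li > lim then (st.1.set i.toNat lim, st.2 ++ [li - lim])
        else (st.1, st.2 ++ [0]))
      (lista, [(0 : Int)]))).2

-- ===== PORT B =====
-- B-side helper: the prefix-minimum table (the `for x in lista: p.append(m)` pass of Source B;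
-- the running minimum `m = None` start is the Option state)
def pmins (m : Option Int) (xs : List Int) : List Int :=
  match xs with
  | [] => []
  | x :: rest =>
    match m with
    | none => x :: pmins (some x) rest
    | some v => min v x :: pmins (some (min v x)) rest

def blefe_alt (lista : List Int) : List Int :=
  List.zipWith (fun x m => x - m) lista (pmins none lista)

-- ===== PRECONDITION & SPEC =====
def Spec_blefe (lista : List Int) (out : List Int) : Prop := out = blefe_alt lista
instance (lista : List Int) (out : List Int) : Decidable (Spec_blefe lista out) := by unfold Spec_blefe; infer_instance

-- ===== CLAIM (what is proved, stated in full; the proofs are below) =====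
def Claim_equal_blefe : Prop := ∀ (lista : List Int), Dom_blefe lista → Spec_blefe lista (blefe lista)

-- ===== LEMMAS AND PROOFS =====

theorem pmins_length (m : Option Int) (xs : List Int) : (pmins m xs).length = xs.length := by
  induction xs generalizing m with
  | nil => rfl
  | cons x rest ih => cases m <;> simp [pmins, ih]

theorem pmins_rec (m : Option Int) (xs : List Int) (k : Nat) (hk : k + 1 < xs.length) :
    (pmins m xs)[k + 1]'(by rw [pmins_length]; exact hk) =
      min ((pmins m xs)[k]'(by rw [pmins_length]; omega)) (xs[k + 1]) := by
  induction xs generalizing m k with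
  | nil => simp at hk
  | cons x rest ih =>
    cases m with
    | none =>
      cases k with
      | zero =>
        cases rest with
        | nil => simp at hk
        | cons y ys => simp [pmins]
      | succ k =>
        simp only [pmins, List.getElem_cons_succ]
        exact ih (some x) k (by simpa using hk)
    | some v =>
      cases k with
      | zero =>
        cases rest with
        | nil => simp at hk
        | cons y ys => simp [pmins]
      | succ k =>
        simp only [pmins, List.getElem_cons_succ]
        exact ih (some (min v x)) k (by simpa using hk)

-- abbreviation for A's loop body used in the proofs
def stepA (st : List Int × List Int) (i : Int) : List Int × List Int :=
  let li := (PySem.List.pyGet? st.1 i).getD 0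
  let lim := (PySem.List.pyGet? st.1 (i - 1)).getD 0
  if li > lim then (st.1.set i.toNat lim, st.2 ++ [li - lim])
  else (st.1, st.2 ++ [0])

-- the loop invariant: after indices 1..n-1, the list is the prefix-min table up to n and
-- the accumulator is the element-wise difference on the first n positions
theorem loop_inv (lista : List Int) (n : Nat) (h1 : 1 ≤ n) (hn : n ≤ lista.length) :
    ((PySem.List.pyRange 1 (n : Int) 1).foldl stepA (lista, [(0 : Int)])) =
      ((pmins none lista).take n ++ lista.drop n,
       List.zipWith (fun x m => x - m) (lista.take n) ((pmins none lista).take n)) := by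
  induction n with
  | zero => omega
  | succ n ih =>
    by_cases hn1 : n = 0
    · subst hn1
      obtain ⟨x, rest, rfl⟩ : ∃ x rest, lista = x :: rest := by
        cases lista with
        | nil => simp at hn
        | cons x rest => exact ⟨x, rest, rfl⟩
      simp [PySem.List.pyRange_one_eq_nil, pmins]
    · have h1n : 1 ≤ n := by omega
      have hnl : n < lista.length := by omega
      have hrange : PySem.List.pyRange 1 ((n : Int) + 1) 1 =
          PySem.List.pyRange 1 (n : Int) 1 ++ [(n : Int)] :=
        PySem.List.pyRange_one_succ_right (by exact_mod_cast h1n)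
      have hcast : ((n + 1 : Nat) : Int) = (n : Int) + 1 := by push_cast; ring
      rw [hcast, hrange, List.foldl_append, ih h1n (le_of_lt hnl)]
      set p := pmins none lista with hp
      have hpl : p.length = lista.length := pmins_length none lista
      have hntake : (p.take n).length = n := by rw [List.length_take]; omega
      -- the current list, written with position n exposed
      have hdrop : lista.drop n = lista[n] :: lista.drop (n + 1) :=
        List.drop_eq_getElem_cons hnl
      have hli : (PySem.List.pyGet? (p.take n ++ lista.drop n) (n : Int)).getD 0 = lista[n] := by
        rw [hdrop, show ((n : Int)) = ((List.take n p).length : Int) by rw [hntake],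
          PySem.List.pyGet?_append_length]
        rfl
      have hpn1 : n - 1 < p.length := by omega
      have hlim : (PySem.List.pyGet? (p.take n ++ lista.drop n) ((n : Int) - 1)).getD 0 =
          p[n - 1] := by
        have hc : ((n : Int) - 1) = ((n - 1 : Nat) : Int) := by omega
        rw [hc, PySem.List.pyGet?_natCast]
        have hlt : n - 1 < (p.take n ++ lista.drop n).length := by
          simp [hntake]; omega
        rw [List.getElem?_eq_getElem hlt]
        have : (p.take n ++ lista.drop n)[n - 1]'hlt = (p.take n)[n - 1]'(by omega) := by
          rw [List.getElem_append_left (by omega)]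
        rw [this]
        simp [List.getElem_take]
      -- the prefix-min recurrence at position n
      have hrec : p[n]'(by omega) = min (p[n - 1]'hpn1) (lista[n]) := by
        have := pmins_rec none lista (n - 1) (by omega)
        simpa [hp, Nat.sub_add_cancel h1n] using this
      have htakes : p.take (n + 1) = p.take n ++ [p[n]'(by omega)] := by
        rw [List.take_add_one, List.getElem?_eq_getElem (by omega)]; rfl
      have hltakes : lista.take (n + 1) = lista.take n ++ [lista[n]] := by
        rw [List.take_add_one, List.getElem?_eq_getElem hnl]; rfl
      have hzlen : (lista.take n).length = (p.take n).length := by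
        rw [List.length_take, List.length_take]; omega
      have hzip : List.zipWith (fun x m => x - m) (lista.take (n + 1)) (p.take (n + 1)) =
          List.zipWith (fun x m => x - m) (lista.take n) (p.take n)
            ++ [lista[n] - p[n]'(by omega)] := by
        rw [htakes, hltakes, List.zipWith_append hzlen]; rfl
      show stepA _ _ = _
      rw [stepA]
      simp only [hli, hlim]
      by_cases hgt : lista[n] > p[n - 1]'hpn1
      · have hmin : p[n]'(by omega) = p[n - 1]'hpn1 := by rw [hrec]; omega
        rw [if_pos hgt]
        refine Prod.ext ?_ ?_
        · show (p.take n ++ lista.drop n).set (n : Int).toNat (p[n-1]'hpn1) = _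
          rw [hdrop]
          have hset : (p.take n ++ lista[n] :: lista.drop (n + 1)).set n (p[n-1]'hpn1)
              = p.take n ++ (p[n-1]'hpn1) :: lista.drop (n + 1) := by
            rw [List.set_append_right _ _ (by rw [hntake]), hntake]
            simp only [Nat.sub_self, List.set_cons_zero]
          simp only [Int.toNat_natCast, hset]
          rw [htakes, hmin]
          simp
        · show List.zipWith _ (lista.take n) (p.take n) ++ [lista[n] - p[n-1]'hpn1] = _
          rw [hzip, hmin]
      · have hmin : p[n]'(by omega) = lista[n] := by rw [hrec]; omega
        rw [if_neg hgt]
        refine Prod.ext ?_ ?_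
        · show p.take n ++ lista.drop n = _
          rw [htakes, hmin, hdrop]
          simp
        · show List.zipWith _ (lista.take n) (p.take n) ++ [(0:Int)] = _
          rw [hzip, hmin]
          simp

-- ===== VERDICT (by name: the statement is the Claim_ definition above) =====
theorem blefe_spec : Claim_equal_blefe := by
  intro lista _
  unfold Spec_blefe
  cases hl : lista with
  | nil => simp [blefe, blefe_alt]
  | cons x rest =>
    rw [← hl]
    have hlen : 1 ≤ lista.length := by rw [hl]; simp
    unfold blefe
    rw [if_neg (by omega)]
    have := loop_inv lista lista.length hlen (le_refl _)
    have hfold : ((PySem.List.pyRange 1 (lista.length : Int) 1).foldl stepA (lista, [(0:Int)]))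
        = _ := this
    show (((PySem.List.pyRange 1 (lista.length : Int) 1).foldl
      (fun (st : List Int × List Int) (i : Int) =>
        let li := (PySem.List.pyGet? st.1 i).getD 0
        let lim := (PySem.List.pyGet? st.1 (i - 1)).getD 0
        if li > lim then (st.1.set i.toNat lim, st.2 ++ [li - lim])
        else (st.1, st.2 ++ [0]))
      (lista, [(0 : Int)]))).2 = blefe_alt lista
    have hstep : (fun (st : List Int × List Int) (i : Int) =>
        let li := (PySem.List.pyGet? st.1 i).getD 0
        let lim := (PySem.List.pyGet? st.1 (i - 1)).getD 0
        if li > lim then (st.1.set i.toNat lim, st.2 ++ [li - lim])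
        else (st.1, st.2 ++ [0])) = stepA := rfl
    rw [hstep, hfold]
    have hpl : (pmins none lista).length = lista.length := pmins_length none lista
    simp [blefe_alt, List.take_of_length_le hpl.le]
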